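-- pv_equiv track=rewrite | github.com/Gabriel-Bastos-Rabelo/marathon-training | backtracking/prime_ring.py | ring
-- ===== SOURCE A (Python) =====
-- def ehPrimo(elm1, elm2):
--     soma = elm1 + elm2
--     if (soma == 2):
--         return True
--     cont = 0
--     for i in range(1, soma):
--         if soma % i == 0:
--             cont += 1
--         if cont > 1:
--             return False
--
--     return True
--
-- def ring(n, i, lista, lista_geral):
--     if len(lista) == n:
--         if (ehPrimo(lista[0], lista[n-1])):
--             lista_geral.append(lista.copy())
--
--     for j in range(1, n+1):
--         if j not in lista:
--             if (ehPrimo(j, lista[len(lista) - 1]) == False):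
--                 continue
--             else:
--                 lista.append(j)
--
--                 ring(n, i, lista, lista_geral)
--                 lista.pop()
--
--     return lista_geral
-- ===== SOURCE B (Python) =====
-- def _prime_sum(s):
--     # True iff s <= 2 or s is prime (trial division up to sqrt)
--     if s <= 2:
--         return True
--     d = 2
--     while d * d <= s:
--         if s % d == 0:
--             return False
--         d += 1
--     return True
--
--
-- def _nbrs(n, v):
--     return [u for u in range(1, n + 1) if u != v and _prime_sum(u + v)]
--
--
-- def ring(n, i, lista, lista_geral):
--     # Precompute adjacency: for each value in 1..n, its prime-sum partners.
--     adj = {v: _nbrs(n, v) for v in range(1, n + 1)}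
--
--     def dfs(cur):
--         if len(cur) == n and _prime_sum(cur[0] + cur[-1]):
--             lista_geral.append(cur.copy())
--         last = cur[-1]
--         for j in (adj[last] if last in adj else _nbrs(n, last)):
--             if j not in cur:
--                 dfs(cur + [j])
--
--     dfs(list(lista))
--     return lista_geral
-- ===== Notes on version B (the rewrite author's own statement) =====
-- stated objective: alternative
-- what changed: B replaces A's O(s) divisor-counting primality test by sqrt-trial-division and precomputes an adjacency table of prime-sum partners for 1..n that the DFS iterates over (skipping used values) instead of re-testing every j in 1..n at every node; the exponential backtracking search dominates, so this was not measurably faster.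
-- outside the precondition, e.g. on ring(-2, 0, [], []): A returns [], B raises IndexError
import Mathlib
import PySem

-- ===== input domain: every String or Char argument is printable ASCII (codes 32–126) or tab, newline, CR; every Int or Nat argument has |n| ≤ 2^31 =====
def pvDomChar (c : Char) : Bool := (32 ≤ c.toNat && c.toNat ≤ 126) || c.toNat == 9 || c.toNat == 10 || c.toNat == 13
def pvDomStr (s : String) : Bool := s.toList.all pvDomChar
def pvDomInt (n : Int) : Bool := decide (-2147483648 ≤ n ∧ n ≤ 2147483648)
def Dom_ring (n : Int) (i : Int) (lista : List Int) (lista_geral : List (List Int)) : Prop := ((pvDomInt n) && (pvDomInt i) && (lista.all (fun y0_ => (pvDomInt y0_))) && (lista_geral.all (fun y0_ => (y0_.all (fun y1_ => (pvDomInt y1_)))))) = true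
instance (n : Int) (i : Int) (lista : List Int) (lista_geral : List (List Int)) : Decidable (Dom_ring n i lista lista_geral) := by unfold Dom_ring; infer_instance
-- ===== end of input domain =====

-- B tests primality by trial division up to sqrt and precomputes an adjacency table (prime-sum
-- partners for each value 1..n) that the DFS iterates over instead of re-testing every j in 1..n
-- at every node (an alternative decomposition; the backtracking search itself dominates the cost).
-- Equivalence is about the RETURN value; both A and B append the found rings to lista_geral in
-- place (A also mutates lista transiently but restores it).

-- ===== PORT A =====
-- the divisor-counting loop of ehPrimo (early return False once cont > 1)
def ehPrimoLoop (soma : Int) : List Int → Int → Bool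
  | [], _ => true
  | i :: rest, cont =>
    let cont' := if PySem.Int.mod soma i == 0 then cont + 1 else cont
    if cont' > 1 then false else ehPrimoLoop soma rest cont'

def ehPrimo (elm1 : Int) (elm2 : Int) : Bool :=
  let soma := elm1 + elm2
  if soma == 2 then true
  else ehPrimoLoop soma (PySem.List.pyRange 1 soma 1) 0

-- A's recursion, with a fuel bound on recursion depth (the Python recursion appends one fresh
-- element of 1..n per level, so its depth never exceeds n; fuel n.toNat+1 is only a totality guard)
def ringLoop (n : Int) : Nat → List Int → List (List Int) → List (List Int)
  | 0, _, acc => acc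
  | fuel+1, lista, acc =>
    let acc1 := if ((lista.length : Int) == n) &&
        ehPrimo (PySem.List.pyGetD lista 0 0) (PySem.List.pyGetD lista (n-1) 0)
      then acc ++ [lista] else acc
    (PySem.List.pyRange 1 (n+1) 1).foldl (fun acc j =>
      if lista.contains j then acc
      else if ehPrimo j (PySem.List.pyGetD lista ((lista.length : Int) - 1) 0) == false then acc
      else ringLoop n fuel (lista ++ [j]) acc) acc1

def ring (n : Int) (i : Int) (lista : List Int) (lista_geral : List (List Int)) : List (List Int) :=
  ringLoop n (n.toNat + 1) lista lista_geral

-- ===== PORT B =====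
-- trial division d = 2, 3, … while d*d ≤ s; the Nat argument is only a structural totality
-- guard for the while-loop (primeSum supplies enough fuel: the loop runs while d*d ≤ s)
def trialLoop (s : Int) : Nat → Int → Bool
  | 0, _ => true
  | fuel+1, d =>
    if d * d ≤ s then
      (if PySem.Int.mod s d == 0 then false else trialLoop s fuel (d + 1))
    else true

def primeSum (s : Int) : Bool := if s ≤ 2 then true else trialLoop s s.toNat 2

-- _nbrs(n, v)
def nbrs (n : Int) (v : Int) : List Int :=
  (PySem.List.pyRange 1 (n+1) 1).filter (fun u => u != v && primeSum (u + v))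

-- adj = {v: _nbrs(n, v) for v in range(1, n+1)}
def mkAdj (n : Int) : PySem.Dict Int (List Int) :=
  (PySem.List.pyRange 1 (n+1) 1).foldl (fun d v => d.insert v (nbrs n v)) PySem.Dict.empty

-- dfs(cur), with the same fuel-style totality guard as A's port
def ringAltLoop (n : Int) (adj : PySem.Dict Int (List Int)) :
    Nat → List Int → List (List Int) → List (List Int)
  | 0, _, acc => acc
  | fuel+1, cur, acc =>
    let acc1 := if ((cur.length : Int) == n) &&
        primeSum (PySem.List.pyGetD cur 0 0 + PySem.List.pyGetD cur (-1) 0)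
      then acc ++ [cur] else acc
    let last := PySem.List.pyGetD cur (-1) 0
    let cands := match adj.get? last with
      | some l => l
      | none => nbrs n last
    cands.foldl (fun acc j =>
      if cur.contains j then acc else ringAltLoop n adj fuel (cur ++ [j]) acc) acc1

def ring_alt (n : Int) (i : Int) (lista : List Int) (lista_geral : List (List Int)) : List (List Int) :=
  ringAltLoop n (mkAdj n) (n.toNat + 1) lista lista_geral

-- ===== PRECONDITION & SPEC =====
-- Pre_ excludes empty lista: for n ≥ 0 A raises IndexError there (lista[-1] / lista[0]), and for
-- n < 0 — where A trivially returns lista_geral unchanged — B's DFS itself raises on cur[-1].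
def Pre_ring (n : Int) (i : Int) (lista : List Int) (lista_geral : List (List Int)) : Prop :=
  lista ≠ []
instance (n : Int) (i : Int) (lista : List Int) (lista_geral : List (List Int)) : Decidable (Pre_ring n i lista lista_geral) := by unfold Pre_ring; infer_instance

def pvWitness_ring : Int × Int × List Int × List (List Int) := (4, 1, [1], [])

def Spec_ring (n : Int) (i : Int) (lista : List Int) (lista_geral : List (List Int)) (out : List (List Int)) : Prop := out = ring_alt n i lista lista_geral
instance (n : Int) (i : Int) (lista : List Int) (lista_geral : List (List Int)) (out : List (List Int)) : Decidable (Spec_ring n i lista lista_geral out) := by unfold Spec_ring; infer_instance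

-- ===== CLAIM (what is proved, stated in full; the proofs are below) =====
def Claim_equal_ring : Prop := ∀ (n : Int) (i : Int) (lista : List Int) (lista_geral : List (List Int)), Dom_ring n i lista lista_geral → Pre_ring n i lista lista_geral → Spec_ring n i lista lista_geral (ring n i lista lista_geral)

-- ===== LEMMAS AND PROOFS =====

theorem trialLoop_iff (s : Int) : ∀ (fuel : Nat) (d : Int), 2 ≤ d → (s - d).toNat < fuel →
    (trialLoop s fuel d = true ↔ ∀ e : Int, d ≤ e → e * e ≤ s → ¬ e ∣ s) := by
  intro fuel
  induction fuel with
  | zero => intro d _ hf; exact absurd hf (by omega)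
  | succ fuel ih =>
    intro d hd hf
    simp only [trialLoop]
    by_cases hdd : d * d ≤ s
    · rw [if_pos hdd]
      have h2d : 2 * d ≤ s := by nlinarith
      by_cases hm : PySem.Int.mod s d = 0
      · have hdvd : d ∣ s := (PySem.Int.mod_eq_zero_iff_dvd s d).mp hm
        rw [if_pos (beq_iff_eq.mpr hm)]
        simp only [Bool.false_eq_true, false_iff]
        intro hall
        exact hall d le_rfl hdd hdvd
      · rw [if_neg (by simpa using hm)]
        have hnd : ¬ d ∣ s := fun hdv => hm ((PySem.Int.mod_eq_zero_iff_dvd s d).mpr hdv)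
        rw [ih (d + 1) (by omega) (by omega)]
        constructor
        · intro hall e he hee
          rcases eq_or_lt_of_le he with rfl | hlt
          · exact hnd
          · exact hall e (by omega) hee
        · intro hall e he hee
          exact hall e (by omega) hee
    · rw [if_neg hdd]
      refine ⟨fun _ e he hee hdvd => ?_, fun _ => rfl⟩
      have hsq : d * d ≤ e * e := mul_le_mul he he (by omega) (by omega)
      exact hdd (hsq.trans hee)

theorem ehPrimoLoop_one_iff (s : Int) (l : List Int) :
    ehPrimoLoop s l 1 = true ↔ ∀ x ∈ l, ¬ (PySem.Int.mod s x = 0) := by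
  induction l with
  | nil => simp [ehPrimoLoop]
  | cons x rest ih =>
    by_cases hx : PySem.Int.mod s x = 0
    · simp [ehPrimoLoop, hx]
    · simp [ehPrimoLoop, hx, ih]

theorem no_small_divisor_iff (s : Int) (hs : 3 ≤ s) :
    (∀ x : Int, 2 ≤ x → x < s → ¬ x ∣ s) ↔ (∀ e : Int, 2 ≤ e → e * e ≤ s → ¬ e ∣ s) := by
  constructor
  · intro hall e he hee
    have h2e : 2 * e ≤ e * e := by nlinarith
    exact hall e he (by omega)
  · intro hall x hx hxs hdvd
    obtain ⟨k, hk⟩ := hdvd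
    have hx0 : 0 < x := by omega
    have hk2 : 2 ≤ k := by nlinarith
    by_cases hxx : x * x ≤ s
    · exact hall x hx hxx ⟨k, hk⟩
    · have hkx : k < x := by nlinarith
      have hkk : k * k ≤ s := by nlinarith
      exact hall k hk2 hkk ⟨x, by linarith [hk, mul_comm x k]⟩

theorem ehPrimo_eq_primeSum (a b : Int) : ehPrimo a b = primeSum (a + b) := by
  unfold ehPrimo primeSum
  by_cases h2 : a + b = 2
  · simp [h2]
  · rw [if_neg (by simpa using h2)]
    by_cases hle : a + b ≤ 2
    · rw [if_pos hle, PySem.List.pyRange_one_eq_nil (by omega)]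
      simp [ehPrimoLoop]
    · rw [if_neg hle, PySem.List.pyRange_one_cons (by omega)]
      have h1 : PySem.Int.mod (a + b) 1 = 0 :=
        (PySem.Int.mod_eq_zero_iff_dvd _ 1).mpr (one_dvd _)
      simp only [ehPrimoLoop, h1]
      norm_num
      rw [Bool.eq_iff_iff, ehPrimoLoop_one_iff, trialLoop_iff _ (a+b).toNat 2 le_rfl (by omega)]
      simp only [PySem.List.mem_pyRange_one, PySem.Int.mod_eq_zero_iff_dvd]
      have := no_small_divisor_iff (a + b) (by omega)
      constructor
      · intro hall
        exact this.mp (fun x hx hxs => hall x ⟨hx, hxs⟩)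
      · intro hall x hx
        exact this.mpr hall x hx.1 hx.2

theorem get?_foldl_insert_nbrs (n : Int) (L : List Int) (d : PySem.Dict Int (List Int))
    (hd : ∀ k v, d.get? k = some v → v = nbrs n k) :
    ∀ k v, (L.foldl (fun d v => d.insert v (nbrs n v)) d).get? k = some v → v = nbrs n k := by
  induction L generalizing d with
  | nil => exact hd
  | cons x rest ih =>
    simp only [List.foldl_cons]
    apply ih
    intro k v hkv
    rw [PySem.Dict.get?_insert] at hkv
    by_cases hkx : k = x
    · subst hkx
      rw [if_pos rfl] at hkv
      exact (Option.some_injective _ hkv).symm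
    · rw [if_neg hkx] at hkv
      exact hd k v hkv

theorem mkAdj_get? (n last : Int) (l : List Int) :
    (mkAdj n).get? last = some l → l = nbrs n last := by
  exact get?_foldl_insert_nbrs n _ PySem.Dict.empty (by simp [PySem.Dict.get?_empty]) last l

theorem loop_eq (n : Int) : ∀ (fuel : Nat) (cur : List Int) (acc : List (List Int)), cur ≠ [] →
    ringLoop n fuel cur acc = ringAltLoop n (mkAdj n) fuel cur acc := by
  intro fuel
  induction fuel with
  | zero => intro cur acc _; rfl
  | succ fuel ih =>
    intro cur acc hne
    simp only [ringLoop, ringAltLoop]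
    have hlen : 0 < cur.length := List.length_pos_iff.mpr hne
    have hlast1 : PySem.List.pyGetD cur (-1) 0 = cur.getLast hne :=
      PySem.List.pyGetD_neg_one cur 0 hne
    have hlast2 : PySem.List.pyGetD cur ((cur.length : Int) - 1) 0 = cur.getLast hne := by
      have hcast : ((cur.length : Int) - 1) = ((cur.length - 1 : Nat) : Int) := by
        push_cast [hlen]; omega
      rw [hcast, PySem.List.pyGetD_natCast, List.getD_eq_getElem _ _ (by omega),
        List.getLast_eq_getElem]
    have hacc1 : (if ((cur.length : Int) == n) &&
          ehPrimo (PySem.List.pyGetD cur 0 0) (PySem.List.pyGetD cur (n-1) 0)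
        then acc ++ [cur] else acc)
        = (if ((cur.length : Int) == n) &&
          primeSum (PySem.List.pyGetD cur 0 0 + PySem.List.pyGetD cur (-1) 0)
        then acc ++ [cur] else acc) := by
      by_cases hn : (cur.length : Int) = n
      · have hidx : PySem.List.pyGetD cur (n-1) 0 = cur.getLast hne := by
          rw [← hn]; exact hlast2
        rw [hidx, hlast1, ehPrimo_eq_primeSum]
      · have hb : ((cur.length : Int) == n) = false := by simpa using hn
        rw [hb]
        simp
    rw [hacc1, hlast1, hlast2]
    have hcands : (match (mkAdj n).get? (cur.getLast hne) with
        | some l => l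
        | none => nbrs n (cur.getLast hne)) = nbrs n (cur.getLast hne) := by
      cases hg : (mkAdj n).get? (cur.getLast hne) with
      | none => rfl
      | some l => exact mkAdj_get? n _ l hg
    rw [hcands, nbrs, ← PySem.List.foldl_if_eq_foldl_filter]
    apply PySem.List.foldl_congr_mem
    intro acc' j _
    by_cases hc : cur.contains j
    · have hm : j ∈ cur := by simpa using hc
      simp [hm]
    · have hjcur : j ∉ cur := by simpa using hc
      have hjne : j ≠ cur.getLast hne := fun h => hjcur (h ▸ List.getLast_mem hne)
      cases hps : primeSum (j + cur.getLast hne) with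
      | false => simp [ehPrimo_eq_primeSum, hps]
      | true =>
        simp only [ehPrimo_eq_primeSum, hps]
        simp [hjcur, hjne]
        exact ih (cur ++ [j]) acc' (by simp)

-- ===== VERDICT (by name: the statement is the Claim_ definition above) =====
theorem ring_spec : Claim_equal_ring := by
  intro n i lista lista_geral _hdom hpre
  unfold Spec_ring ring ring_alt
  exact loop_eq n (n.toNat + 1) lista lista_geral hpre
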